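-- pv_equiv track=rewrite | github.com/eatdetey/python | lab1/one.py | product_of_divisors_with_smaller_digit_sum
-- ===== SOURCE A (Python) =====
-- def sum_of_digits(n):
--     return sum(int(digit) for digit in str(n))
--
-- def product_of_divisors_with_smaller_digit_sum(num):
--     original_digit_sum = sum_of_digits(num)
--     product = 1
--     found = False
--
--     for i in range(1, num + 1):
--         if num % i == 0:
--             if sum_of_digits(i) < original_digit_sum:
--                 product *= i
--                 found = True
--
--     return product if found else 0
-- ===== SOURCE B (Python) =====
-- def sum_of_digits(n):
--     return sum(int(digit) for digit in str(n))
--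
-- def product_of_divisors_with_smaller_digit_sum(num):
--     s = sum_of_digits(num)
--     divisors = []
--     i = 1
--     while i * i <= num:
--         if num % i == 0:
--             divisors.append(i)
--             if i * i < num:
--                 divisors.append(num // i)
--         i += 1
--     product = 1
--     found = False
--     for d in divisors:
--         if sum_of_digits(d) < s:
--             product *= d
--             found = True
--     return product if found else 0
-- ===== Notes on version B (the rewrite author's own statement) =====
-- stated objective: faster
-- what changed: B enumerates divisors by trial division only up to sqrt(num), collecting each divisor i together with its cofactor num//i, instead of A's scan of every i in 1..num; a second pass multiplies the collected divisors with smaller digit sum.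
import Mathlib
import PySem

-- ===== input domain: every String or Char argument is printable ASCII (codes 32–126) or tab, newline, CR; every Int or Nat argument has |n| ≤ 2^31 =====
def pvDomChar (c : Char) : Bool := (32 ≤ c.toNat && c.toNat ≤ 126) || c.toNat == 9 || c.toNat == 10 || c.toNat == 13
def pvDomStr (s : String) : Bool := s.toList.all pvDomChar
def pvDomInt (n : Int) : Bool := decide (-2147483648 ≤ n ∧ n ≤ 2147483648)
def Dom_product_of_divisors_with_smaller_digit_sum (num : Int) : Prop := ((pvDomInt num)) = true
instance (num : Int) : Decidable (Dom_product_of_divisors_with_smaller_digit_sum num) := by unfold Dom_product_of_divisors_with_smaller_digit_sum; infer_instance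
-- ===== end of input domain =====

-- B enumerates the divisors by trial division up to sqrt(num) (O(sqrt n) divisor tests instead
-- of A's O(n)) and then does one multiply pass over the collected divisor list.

-- ===== PORT A =====
-- shared helper: both Pythons contain the identical 'sum_of_digits'; the '.getD 0' stands for
-- int(digit) and is exact whenever n ≥ 0 (every character of str(n) is then a digit, so
-- PySem.Int.ofStr? is 'some' there); n < 0 is excluded by Pre_ (ValueError in both Pythons).
def pySumOfDigits (n : Int) : Int :=
  ((PySem.Int.toChars n).map (fun c => (PySem.Int.ofStr? (String.ofList [c])).getD 0)).sum

def product_of_divisors_with_smaller_digit_sum (num : Int) : Int :=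
  let originalDigitSum := pySumOfDigits num
  let st := (PySem.List.pyRange 1 (num + 1) 1).foldl
    (fun (st : Int × Bool) i =>
      if PySem.Int.mod num i = 0 then
        if pySumOfDigits i < originalDigitSum then (st.1 * i, true) else st
      else st) (1, false)
  if st.2 then st.1 else 0

-- ===== PORT B =====
-- the while-loop of Source B: collect i (and num // i) for i = 1, 2, … while i * i <= num
def buildDivisors (num : Int) (i : Int) (divisors : List Int) : List Int :=
  if _h : i * i ≤ num then
    buildDivisors num (i + 1)
      (divisors ++ (if PySem.Int.mod num i = 0 then
          (if i * i < num then [i, PySem.Int.floordiv num i] else [i])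
        else []))
  else divisors
termination_by (num + 1 - i).toNat
decreasing_by
  rcases (by omega : i ≤ 0 ∨ 1 ≤ i) with hi | hi
  · have hn : (0:Int) ≤ num := le_trans (mul_self_nonneg i) _h
    omega
  · have h1 : i ≤ i * i := le_mul_of_one_le_left (by omega) (by omega)
    have h2 : i ≤ num := le_trans h1 _h
    omega

def product_of_divisors_with_smaller_digit_sum_alt (num : Int) : Int :=
  let s := pySumOfDigits num
  let divisors := buildDivisors num 1 []
  let st := divisors.foldl
    (fun (st : Int × Bool) d =>
      if pySumOfDigits d < s then (st.1 * d, true) else st) (1, false)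
  if st.2 then st.1 else 0

-- ===== PRECONDITION & SPEC =====
-- Pre_ excludes exactly the negative inputs, where A raises ValueError (int('-') inside sum_of_digits).
def Pre_product_of_divisors_with_smaller_digit_sum (num : Int) : Prop := 0 ≤ num
instance (num : Int) : Decidable (Pre_product_of_divisors_with_smaller_digit_sum num) := by unfold Pre_product_of_divisors_with_smaller_digit_sum; infer_instance
def pvWitness_product_of_divisors_with_smaller_digit_sum : Int := 12

def Spec_product_of_divisors_with_smaller_digit_sum (num : Int) (out : Int) : Prop := out = product_of_divisors_with_smaller_digit_sum_alt num
instance (num : Int) (out : Int) : Decidable (Spec_product_of_divisors_with_smaller_digit_sum num out) := by unfold Spec_product_of_divisors_with_smaller_digit_sum; infer_instance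

-- ===== CLAIM (what is proved, stated in full; the proofs are below) =====
def Claim_equal_product_of_divisors_with_smaller_digit_sum : Prop := ∀ (num : Int), Dom_product_of_divisors_with_smaller_digit_sum num → Pre_product_of_divisors_with_smaller_digit_sum num → Spec_product_of_divisors_with_smaller_digit_sum num (product_of_divisors_with_smaller_digit_sum num)

-- ===== LEMMAS AND PROOFS =====

-- the divisor list B builds, written back-to-front (structural form of buildDivisors)
def divListB (num : Int) (i : Int) : List Int :=
  if _h : i * i ≤ num then
    (if PySem.Int.mod num i = 0 then
       (if i * i < num then [i, PySem.Int.floordiv num i] else [i])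
     else []) ++ divListB num (i + 1)
  else []
termination_by (num + 1 - i).toNat
decreasing_by
  rcases (by omega : i ≤ 0 ∨ 1 ≤ i) with hi | hi
  · have hn : (0:Int) ≤ num := le_trans (mul_self_nonneg i) _h
    omega
  · have h1 : i ≤ i * i := le_mul_of_one_le_left (by omega) (by omega)
    have h2 : i ≤ num := le_trans h1 _h
    omega

lemma buildDivisors_eq (num : Int) : ∀ i acc, buildDivisors num i acc = acc ++ divListB num i := by
  intro i acc
  fun_induction buildDivisors num i acc with
  | case1 i acc h ih =>
    rw [divListB, dif_pos h, ← List.append_assoc]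
    exact ih
  | case2 i acc h =>
    rw [divListB, dif_neg h, List.append_nil]

-- A's divisor list: 1..num filtered by divisibility
def divListA (num : Int) : List Int :=
  (PySem.List.pyRange 1 (num + 1) 1).filter (fun i => decide (PySem.Int.mod num i = 0))

lemma foldl_filter_guard {P : Int → Prop} [DecidablePred P] (g : (Int × Bool) → Int → (Int × Bool)) :
    ∀ (l : List Int) (st : Int × Bool),
      l.foldl (fun st i => if P i then g st i else st) st
        = (l.filter (fun i => decide (P i))).foldl g st := by
  intro l
  induction l with
  | nil => intro st; simp
  | cons hd tl ih =>
    intro st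
    by_cases h : P hd <;> simp [h, ih]

lemma foldl_sod (s : Int) : ∀ (l : List Int) (p : Int) (f : Bool),
    l.foldl (fun st d => if pySumOfDigits d < s then (st.1 * d, true) else st) (p, f)
      = (p * (l.filter (fun d => decide (pySumOfDigits d < s))).prod,
         f || l.any (fun d => decide (pySumOfDigits d < s))) := by
  intro l
  induction l with
  | nil => intro p f; simp
  | cons hd tl ih =>
    intro p f
    by_cases h : pySumOfDigits hd < s
    · simp [h, ih, mul_assoc]
    · simp [h, ih]

lemma mem_divListB (num : Int) (i : Int) : 1 ≤ i → ∀ d,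
    (d ∈ divListB num i ↔ ∃ j, i ≤ j ∧ j * j ≤ num ∧ j ∣ num ∧
      (d = j ∨ (j * j < num ∧ d = num / j))) := by
  fun_induction divListB num i with
  | case1 i h ih =>
    intro hi d
    have hi0 : (0:Int) < i := by omega
    constructor
    · intro hd
      rcases List.mem_append.mp hd with hblk | hrest
      · by_cases hm : PySem.Int.mod num i = 0
        · have hdvd : i ∣ num := (PySem.Int.mod_eq_zero_iff_dvd num i).mp hm
          rw [if_pos hm] at hblk
          by_cases hs : i * i < num
          · rw [if_pos hs, PySem.Int.floordiv_eq_ediv_of_pos hi0] at hblk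
            simp only [List.mem_cons, List.not_mem_nil, or_false] at hblk
            rcases hblk with rfl | rfl
            · exact ⟨d, le_refl d, h, hdvd, Or.inl rfl⟩
            · exact ⟨i, le_refl i, h, hdvd, Or.inr ⟨hs, rfl⟩⟩
          · rw [if_neg hs] at hblk
            simp only [List.mem_cons, List.not_mem_nil, or_false] at hblk
            subst hblk
            exact ⟨d, le_refl d, h, hdvd, Or.inl rfl⟩
        · rw [if_neg hm] at hblk
          simp at hblk
      · obtain ⟨j, hj1, hj2, hj3, hj4⟩ := (ih (by omega) d).mp hrest
        exact ⟨j, by omega, hj2, hj3, hj4⟩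
    · rintro ⟨j, hj1, hj2, hj3, hj4⟩
      by_cases hji : j = i
      · subst hji
        have hm : PySem.Int.mod num j = 0 := (PySem.Int.mod_eq_zero_iff_dvd num j).mpr hj3
        apply List.mem_append.mpr
        left
        rw [if_pos hm]
        rcases hj4 with rfl | ⟨hs, rfl⟩
        · by_cases hs : d * d < num
          · rw [if_pos hs]; simp
          · rw [if_neg hs]; simp
        · rw [if_pos hs, PySem.Int.floordiv_eq_ediv_of_pos (by omega)]
          simp
      · apply List.mem_append.mpr
        right
        exact (ih (by omega) d).mpr ⟨j, by omega, hj2, hj3, hj4⟩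
  | case2 i h =>
    intro hi d
    simp only [List.not_mem_nil, false_iff]
    rintro ⟨j, hj1, hj2, -, -⟩
    have hij : i * i ≤ j * j := mul_le_mul hj1 hj1 (by omega) (by omega)
    have : num < i * i := lt_of_not_ge h
    linarith

-- every element of divListB num i is at least i and divides num
lemma mem_divListB_ge (num : Int) (i : Int) (hi : 1 ≤ i) (d : Int)
    (hd : d ∈ divListB num i) : i ≤ d := by
  obtain ⟨j, hj1, hj2, hj3, hj4⟩ := (mem_divListB num i hi d).mp hd
  rcases hj4 with rfl | ⟨hs, rfl⟩
  · exact hj1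
  · have hj0 : (0:Int) < j := by omega
    have hjq : num / j * j = num := Int.ediv_mul_cancel hj3
    have : j < num / j := by
      have hlt : j * j < num / j * j := by rw [hjq]; exact hs
      exact lt_of_mul_lt_mul_right hlt (by omega)
    linarith

lemma mem_divListB_one (num : Int) (_h : 0 ≤ num) (d : Int) :
    d ∈ divListB num 1 ↔ (1 ≤ d ∧ d ≤ num ∧ d ∣ num) := by
  rw [mem_divListB num 1 (le_refl 1) d]
  constructor
  · rintro ⟨j, hj1, hj2, hj3, hj4⟩
    rcases hj4 with rfl | ⟨hs, rfl⟩
    · refine ⟨hj1, ?_, hj3⟩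
      have : d ≤ d * d := le_mul_of_one_le_left (by omega) hj1
      omega
    · have hj0 : (0:Int) < j := by omega
      have hjq : num / j * j = num := Int.ediv_mul_cancel hj3
      have hlt : j < num / j := by
        have hlt' : j * j < num / j * j := by rw [hjq]; exact hs
        exact lt_of_mul_lt_mul_right hlt' (by omega)
      refine ⟨by linarith, ?_, ⟨j, hjq.symm⟩⟩
      have : num / j ≤ num / j * j := le_mul_of_one_le_right (by linarith) hj1
      linarith
  · rintro ⟨h1, h2, h3⟩
    have hd0 : (0:Int) < d := by omega
    by_cases hdd : d * d ≤ num
    · exact ⟨d, h1, hdd, h3, Or.inl rfl⟩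
    · have hjd : num / d * d = num := Int.ediv_mul_cancel h3
      have hj1 : 1 ≤ num / d := by
        rw [Int.le_ediv_iff_mul_le hd0]; omega
      have hjlt : num / d < d := by
        have hlt' : num / d * d < d * d := by rw [hjd]; omega
        exact lt_of_mul_lt_mul_right hlt' (by omega)
      have hjj : num / d * (num / d) < num := by
        calc num / d * (num / d) < num / d * d := mul_lt_mul_of_pos_left hjlt (by linarith)
          _ = num := hjd
      have hdq : num / (num / d) = d := by
        calc num / (num / d) = (num / d * d) / (num / d) := by rw [hjd]
          _ = d := Int.mul_ediv_cancel_left d (by linarith)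
      exact ⟨num / d, hj1, le_of_lt hjj, ⟨d, hjd.symm⟩, Or.inr ⟨hjj, hdq.symm⟩⟩

lemma nodup_divListB (num : Int) (i : Int) : 1 ≤ i → (divListB num i).Nodup := by
  fun_induction divListB num i with
  | case2 i h =>
    intro _
    simp
  | case1 i h ih =>
    intro hi
    have hi0 : (0:Int) < i := by omega
    have hrest := ih (by omega)
    refine List.Nodup.append ?_ hrest ?_
    · by_cases hm : PySem.Int.mod num i = 0
      · have hdvd : i ∣ num := (PySem.Int.mod_eq_zero_iff_dvd num i).mp hm
        rw [if_pos hm]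
        by_cases hs : i * i < num
        · rw [if_pos hs, PySem.Int.floordiv_eq_ediv_of_pos hi0]
          have hqi : num / i * i = num := Int.ediv_mul_cancel hdvd
          have hiq : i < num / i := by
            have hlt : i * i < num / i * i := by rw [hqi]; exact hs
            exact lt_of_mul_lt_mul_right hlt (by omega)
          simp only [List.nodup_cons, List.mem_cons, List.not_mem_nil, or_false,
            List.nodup_nil, and_true]
          exact ⟨ne_of_lt hiq, not_false⟩
        · rw [if_neg hs]; simp
      · rw [if_neg hm]; simp
    · intro a ha hmem
      by_cases hm : PySem.Int.mod num i = 0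
      · have hdvd : i ∣ num := (PySem.Int.mod_eq_zero_iff_dvd num i).mp hm
        rw [if_pos hm] at ha
        have hqi : num / i * i = num := Int.ediv_mul_cancel hdvd
        by_cases hs : i * i < num
        · rw [if_pos hs, PySem.Int.floordiv_eq_ediv_of_pos hi0] at ha
          simp only [List.mem_cons, List.not_mem_nil, or_false] at ha
          have hiq : i < num / i := by
            have hlt : i * i < num / i * i := by rw [hqi]; exact hs
            exact lt_of_mul_lt_mul_right hlt (by omega)
          rcases ha with rfl | rfl
          · have := mem_divListB_ge num (a + 1) (by omega) a hmem
            omega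
          · have hqq : num < num / i * (num / i) := by
              calc num = num / i * i := hqi.symm
                _ < num / i * (num / i) := mul_lt_mul_of_pos_left hiq (by linarith)
            obtain ⟨j, hj1, hj2, hj3, hj4⟩ := (mem_divListB num (i + 1) (by omega) _).mp hmem
            rcases hj4 with hqj | ⟨hs', hqj⟩
            · rw [hqj] at hqq
              linarith
            · have hjq : num / j * j = num := Int.ediv_mul_cancel hj3
              have heq : num / i * i = num / i * j := by
                rw [hqi, hqj, hjq]
              have hij : i = j := mul_left_cancel₀ (by linarith : (num / i : Int) ≠ 0) heq
              omega
        · rw [if_neg hs] at ha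
          simp only [List.mem_cons, List.not_mem_nil, or_false] at ha
          subst ha
          have := mem_divListB_ge num (a + 1) (by omega) a hmem
          omega
      · rw [if_neg hm] at ha
        simp at ha

lemma mem_divListA (num : Int) (d : Int) :
    d ∈ divListA num ↔ (1 ≤ d ∧ d ≤ num ∧ d ∣ num) := by
  unfold divListA
  simp only [List.mem_filter, PySem.List.mem_pyRange_one, decide_eq_true_eq,
    PySem.Int.mod_eq_zero_iff_dvd]
  constructor
  · rintro ⟨⟨h1, h2⟩, h3⟩
    exact ⟨h1, by omega, h3⟩
  · rintro ⟨h1, h2, h3⟩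
    exact ⟨⟨h1, by omega⟩, h3⟩

lemma perm_divLists (num : Int) (h : 0 ≤ num) : (divListB num 1).Perm (divListA num) := by
  have hnA : (divListA num).Nodup := by
    unfold divListA
    exact (PySem.List.nodup_pyRange_one 1 (num + 1)).filter _
  rw [List.perm_ext_iff_of_nodup (nodup_divListB num 1 (le_refl 1)) hnA]
  intro a
  rw [mem_divListB_one num h a, mem_divListA num a]

-- ===== VERDICT (by name: the statement is the Claim_ definition above) =====
theorem product_of_divisors_with_smaller_digit_sum_spec : Claim_equal_product_of_divisors_with_smaller_digit_sum := by
  intro num _ hpre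
  unfold Spec_product_of_divisors_with_smaller_digit_sum
  have hbuild : buildDivisors num 1 [] = divListB num 1 := by
    rw [buildDivisors_eq]; simp
  simp only [product_of_divisors_with_smaller_digit_sum, product_of_divisors_with_smaller_digit_sum_alt]
  rw [hbuild, foldl_filter_guard, foldl_sod, foldl_sod]
  have hperm := perm_divLists num hpre
  have hprod : ((divListB num 1).filter (fun d => decide (pySumOfDigits d < pySumOfDigits num))).prod
      = ((divListA num).filter (fun d => decide (pySumOfDigits d < pySumOfDigits num))).prod :=
    (hperm.filter _).prod_eq
  have hany : ((divListB num 1).any (fun d => decide (pySumOfDigits d < pySumOfDigits num)))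
      = ((divListA num).any (fun d => decide (pySumOfDigits d < pySumOfDigits num))) := by
    rw [Bool.eq_iff_iff]
    simp only [List.any_eq_true]
    constructor
    · rintro ⟨x, hx, hfx⟩; exact ⟨x, hperm.mem_iff.mp hx, hfx⟩
    · rintro ⟨x, hx, hfx⟩; exact ⟨x, hperm.mem_iff.mpr hx, hfx⟩
  unfold divListA at hprod hany
  rw [hprod, hany]
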